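-- pv_equiv track=rewrite | github.com/Azson/machineLearning | py3/leetcodeCN/competition/2021/2021_3_28-4.py | maxNiceDivisors
-- ===== SOURCE A (Python) =====
-- def maxNiceDivisors(primeFactors):
--     """
--     :type primeFactors: int
--     :rtype: int
--     """
--     mod = int(1e9+7)
--     def qsm(a, b):
--         ret = 1
--         while (b > 0):
--             if (b & 1):
--                 ret = (ret * a) % mod
--             a = (a * a) %mod
--             b >>= 1
--         return ret
--     fac = primeFactors // 3
--     ans = 1
--     if (primeFactors % 3 == 1 and primeFactors > 3):
--         fac -= 1
--         ans = 4
--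
--     ans *= qsm(3, fac) % mod
--     if (primeFactors % 3 == 2):
--         ans = ans * 2 % mod
--     return ans % mod
-- ===== SOURCE B (Python) =====
-- def maxNiceDivisors(primeFactors):
--     mod = 10**9 + 7
--
--     def pow3(e):
--         # 3**e mod `mod`, top-down recursive halving
--         if e <= 0:
--             return 1
--         if e % 2 == 1:
--             return 3 * pow3(e - 1) % mod
--         h = pow3(e // 2)
--         return h * h % mod
--
--     q, r = divmod(primeFactors, 3)
--     if r == 0:
--         return pow3(q)
--     if r == 1:
--         if primeFactors > 3:
--             return 4 * pow3(q - 1) % mod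
--         return pow3(q)
--     return 2 * pow3(q) % mod
-- ===== Notes on version B (the rewrite author's own statement) =====
-- stated objective: alternative
-- what changed: Replaces the bottom-up iterative bit-scanning fast exponentiation with state (ret, a, b) by a top-down recursive halving power function, and replaces the mutate-then-patch remainder handling (fac -=1 / ans=4 / *2 fixups on a shared accumulator) by a direct three-way divmod case split, each branch returning its closed expression.
import Mathlib
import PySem

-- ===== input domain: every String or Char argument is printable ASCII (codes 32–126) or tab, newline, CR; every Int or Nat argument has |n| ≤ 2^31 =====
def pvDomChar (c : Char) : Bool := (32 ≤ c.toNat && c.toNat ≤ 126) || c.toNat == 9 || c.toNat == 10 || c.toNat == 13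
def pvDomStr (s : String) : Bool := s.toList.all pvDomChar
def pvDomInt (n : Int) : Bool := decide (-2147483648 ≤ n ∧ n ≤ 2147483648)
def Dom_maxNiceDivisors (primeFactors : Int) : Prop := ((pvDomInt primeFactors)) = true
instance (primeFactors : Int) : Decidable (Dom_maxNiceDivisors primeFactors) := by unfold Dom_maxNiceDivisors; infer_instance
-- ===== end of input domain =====

-- B replaces A's bottom-up bit-scanning fast exponentiation and mutate-then-patch remainder
-- fixups by a top-down recursive halving power and a direct divmod three-way case split.

-- ===== PORT A =====
-- inner while-loop of qsm; mod = int(1e9+7) = 1000000007 inlined.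
-- `b & 1` is ported as `mod b 2 = 1`: under the loop guard b > 0, Python's b & 1 equals b % 2.
def qsmAux (a b ret : Int) : Int :=
  if 0 < b then
    let ret' := if PySem.Int.mod b 2 = 1 then PySem.Int.mod (ret * a) 1000000007 else ret
    qsmAux (PySem.Int.mod (a * a) 1000000007) (PySem.Int.floordiv b 2) ret'
  else ret
termination_by b.toNat
decreasing_by
  rw [PySem.Int.floordiv_eq_ediv_of_pos (by omega : (0:Int) < 2)]
  omega

def qsm (a b : Int) : Int := qsmAux a b 1

def maxNiceDivisors (primeFactors : Int) : Int :=
  let fac := PySem.Int.floordiv primeFactors 3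
  let ans : Int := 1
  let fac := if PySem.Int.mod primeFactors 3 = 1 ∧ primeFactors > 3 then fac - 1 else fac
  let ans := if PySem.Int.mod primeFactors 3 = 1 ∧ primeFactors > 3 then (4:Int) else ans
  let ans := ans * PySem.Int.mod (qsm 3 fac) 1000000007
  let ans := if PySem.Int.mod primeFactors 3 = 2 then PySem.Int.mod (ans * 2) 1000000007 else ans
  PySem.Int.mod ans 1000000007

-- ===== PORT B =====
def pow3 (e : Int) : Int :=
  if e ≤ 0 then 1
  else if PySem.Int.mod e 2 = 1 then PySem.Int.mod (3 * pow3 (e - 1)) 1000000007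
  else
    let h := pow3 (PySem.Int.floordiv e 2)
    PySem.Int.mod (h * h) 1000000007
termination_by e.toNat
decreasing_by
  · omega
  · rw [PySem.Int.floordiv_eq_ediv_of_pos (by omega : (0:Int) < 2)]
    omega

def maxNiceDivisors_alt (primeFactors : Int) : Int :=
  let q := PySem.Int.floordiv primeFactors 3
  let r := PySem.Int.mod primeFactors 3
  if r = 0 then pow3 q
  else if r = 1 then
    if primeFactors > 3 then PySem.Int.mod (4 * pow3 (q - 1)) 1000000007
    else pow3 q
  else PySem.Int.mod (2 * pow3 q) 1000000007

-- ===== PRECONDITION & SPEC =====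
def Spec_maxNiceDivisors (primeFactors : Int) (out : Int) : Prop := out = maxNiceDivisors_alt primeFactors
instance (primeFactors : Int) (out : Int) : Decidable (Spec_maxNiceDivisors primeFactors out) := by unfold Spec_maxNiceDivisors; infer_instance

-- ===== CLAIM (what is proved, stated in full; the proofs are below) =====
def Claim_equal_maxNiceDivisors : Prop := ∀ (primeFactors : Int), Dom_maxNiceDivisors primeFactors → Spec_maxNiceDivisors primeFactors (maxNiceDivisors primeFactors)

-- ===== LEMMAS AND PROOFS =====

theorem modeq_mul_pow (x y : Int) (k : Nat) :
    (x % 1000000007 * (y % 1000000007) ^ k) % 1000000007 = (x * y ^ k) % 1000000007 := by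
  have hx : x % 1000000007 ≡ x [ZMOD 1000000007] := Int.emod_emod_of_dvd x dvd_rfl
  have hy : y % 1000000007 ≡ y [ZMOD 1000000007] := Int.emod_emod_of_dvd y dvd_rfl
  exact hx.mul (hy.pow k)

theorem qsmAux_nonpos (a b ret : Int) (h : b ≤ 0) : qsmAux a b ret = ret := by
  rw [qsmAux]
  simp [not_lt.mpr h]

theorem qsmAux_pos : ∀ (n : Nat) (b : Int), b.toNat = n → 0 < b → ∀ a ret : Int,
    qsmAux a b ret = (ret * a ^ b.toNat) % 1000000007 := by
  intro n
  induction n using Nat.strong_induction_on with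
  | _ n ih =>
    intro b hbn hb a ret
    rw [qsmAux]
    simp only [if_pos hb]
    have h2 : PySem.Int.floordiv b 2 = b / 2 :=
      PySem.Int.floordiv_eq_ediv_of_pos (by omega)
    have hm : PySem.Int.mod b 2 = b % 2 :=
      PySem.Int.mod_eq_emod_of_pos (by omega)
    rw [h2, hm]
    by_cases hb2 : 0 < b / 2
    · have hrec := ih (b / 2).toNat (by omega) (b / 2) rfl hb2
      set ret' := if b % 2 = 1 then PySem.Int.mod (ret * a) 1000000007 else ret with hret'
      rw [hrec]
      set k := (b / 2).toNat with hk
      have hbt : b.toNat = 2 * k + (b % 2).toNat := by omega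
      have hpow : ((a * a) % 1000000007) ^ k % 1000000007 = a ^ (2 * k) % 1000000007 := by
        have := modeq_mul_pow 1 (a * a) k
        simpa [mul_pow, ← pow_mul, two_mul, pow_add] using this
      rcases Int.emod_two_eq b with h01 | h01
      · -- even bit
        simp only [hret', h01]
        norm_num
        calc (ret * ((a * a) % 1000000007) ^ k) % 1000000007
            = (ret % 1000000007 * (((a*a) % 1000000007) ^ k % 1000000007)) % 1000000007 := by
              rw [← Int.mul_emod]
          _ = (ret % 1000000007 * (a ^ (2*k) % 1000000007)) % 1000000007 := by rw [hpow]
          _ = (ret * a ^ (2*k)) % 1000000007 := by rw [← Int.mul_emod]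
          _ = (ret * a ^ b.toNat) % 1000000007 := by rw [hbt, h01]; norm_num
      · -- odd bit
        simp only [hret', h01]
        norm_num
        calc ((ret * a) % 1000000007 * ((a * a) % 1000000007) ^ k) % 1000000007
            = ((ret * a) % 1000000007 * (((a*a) % 1000000007) ^ k % 1000000007)) % 1000000007 := by
              rw [Int.mul_emod, Int.emod_emod_of_dvd _ dvd_rfl, ← Int.mul_emod]
          _ = ((ret * a) % 1000000007 * (a ^ (2*k) % 1000000007)) % 1000000007 := by rw [hpow]
          _ = (ret * a * a ^ (2*k)) % 1000000007 := by
              rw [Int.mul_emod, Int.emod_emod_of_dvd _ dvd_rfl, Int.emod_emod_of_dvd _ dvd_rfl, ← Int.mul_emod]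
          _ = (ret * a ^ b.toNat) % 1000000007 := by
              simp only [hbt, h01, Int.toNat_one, pow_add, pow_one, pow_mul]
              ring_nf
    · -- b / 2 ≤ 0, so b = 1
      have hb1 : b = 1 := by omega
      subst hb1
      norm_num
      rw [qsmAux_nonpos _ _ _ (by norm_num)]

theorem pow3_nonpos (e : Int) (h : e ≤ 0) : pow3 e = 1 := by
  rw [pow3]; simp [h]

theorem pow3_pos : ∀ (n : Nat) (e : Int), e.toNat = n → 0 < e →
    pow3 e = 3 ^ e.toNat % 1000000007 := by
  intro n
  induction n using Nat.strong_induction_on with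
  | _ n ih =>
    intro e hen he
    rw [pow3]
    simp only [not_le.mpr he, if_false]
    have hm : PySem.Int.mod e 2 = e % 2 := PySem.Int.mod_eq_emod_of_pos (by omega)
    have h2 : PySem.Int.floordiv e 2 = e / 2 := PySem.Int.floordiv_eq_ediv_of_pos (by omega)
    rw [hm, h2, PySem.Int.mod_eq_emod_of_pos (by omega : (0:Int) < 1000000007)]
    rcases Int.emod_two_eq e with h01 | h01
    · -- even: e ≥ 2
      simp only [h01]
      norm_num
      have he2 : 0 < e / 2 := by omega
      rw [ih (e / 2).toNat (by omega) (e / 2) rfl he2]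
      set k := (e / 2).toNat with hk
      have hbt : e.toNat = 2 * k := by omega
      calc (3 ^ k % 1000000007 * (3 ^ k % 1000000007)) % 1000000007
          = ((3:Int) ^ k * 3 ^ k) % 1000000007 := by
            rw [Int.mul_emod, Int.emod_emod_of_dvd _ dvd_rfl, ← Int.mul_emod]
        _ = 3 ^ e.toNat % 1000000007 := by rw [hbt, two_mul, pow_add]
    · -- odd
      simp only [h01]
      norm_num
      by_cases he1 : e = 1
      · subst he1
        rw [pow3_nonpos (1 - 1) (by norm_num)]
        decide
      · have he1' : 0 < e - 1 := by omega
        rw [ih (e - 1).toNat (by omega) (e - 1) rfl he1']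
        have hbt : e.toNat = (e - 1).toNat + 1 := by omega
        calc (3 * (3 ^ (e-1).toNat % 1000000007)) % 1000000007
            = ((3:Int) * 3 ^ (e-1).toNat) % 1000000007 := by
              rw [Int.mul_emod, Int.emod_emod_of_dvd _ dvd_rfl, ← Int.mul_emod]
          _ = 3 ^ e.toNat % 1000000007 := by rw [hbt, pow_succ]; ring_nf

-- qsm 3 f agrees with pow3 f for every integer f.
theorem qsm_eq_pow3 (f : Int) : qsm 3 f = pow3 f := by
  by_cases hf : 0 < f
  · rw [qsm, qsmAux_pos f.toNat f rfl hf, pow3_pos f.toNat f rfl hf, one_mul]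
  · rw [qsm, qsmAux_nonpos _ _ _ (by omega), pow3_nonpos _ (by omega)]

theorem pow3_lt (f : Int) : 0 ≤ pow3 f ∧ pow3 f < 1000000007 := by
  by_cases hf : 0 < f
  · rw [pow3_pos f.toNat f rfl hf]
    exact ⟨Int.emod_nonneg _ (by norm_num), Int.emod_lt_of_pos _ (by norm_num)⟩
  · rw [pow3_nonpos _ (by omega)]; norm_num

-- ===== VERDICT (by name: the statement is the Claim_ definition above) =====
theorem maxNiceDivisors_spec : Claim_equal_maxNiceDivisors := by
  intro n _
  unfold Spec_maxNiceDivisors maxNiceDivisors maxNiceDivisors_alt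
  simp only [qsm_eq_pow3]
  have hm3 : PySem.Int.mod n 3 = n % 3 := PySem.Int.mod_eq_emod_of_pos (by omega)
  have hM : ∀ x : Int, PySem.Int.mod x 1000000007 = x % 1000000007 :=
    fun x => PySem.Int.mod_eq_emod_of_pos (by omega)
  simp only [hm3, hM]
  set q := PySem.Int.floordiv n 3 with hq
  have hr : n % 3 = 0 ∨ n % 3 = 1 ∨ n % 3 = 2 := by omega
  rcases hr with h | h | h
  · -- r = 0
    simp only [h]
    norm_num
    obtain ⟨h0, h1⟩ := pow3_lt q
    omega
  · -- r = 1
    simp only [h]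
    norm_num
    by_cases hn3 : n > 3
    · simp only [if_pos hn3]
      obtain ⟨h0, h1⟩ := pow3_lt (q - 1)
      have : pow3 (q - 1) % 1000000007 = pow3 (q - 1) := Int.emod_eq_of_lt h0 h1
      rw [this]
    · simp only [if_neg hn3]
      -- n ≤ 3 with n % 3 = 1 means n ≤ 1, so q ≤ 0 and pow3 q = 1
      have hq0 : q ≤ 0 := by
        rw [hq, PySem.Int.floordiv_eq_ediv_of_pos (by omega : (0:Int) < 3)]
        omega
      rw [pow3_nonpos q hq0]
      decide
  · -- r = 2
    simp only [h]
    norm_num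
    obtain ⟨h0, h1⟩ := pow3_lt q
    have hself : pow3 q % 1000000007 = pow3 q := Int.emod_eq_of_lt h0 h1
    rw [hself, mul_comm (pow3 q) 2]
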